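-- pv_equiv track=rewrite | github.com/HardyHasan94/GoogleCodeJam | 2021/QualificationRound/moons_umbrellas.py | positive_case
-- ===== SOURCE A (Python) =====
-- def find_closest_letter(s):
--     """Find and return the first non-empty letter."""
--     for el in s:
--         if el != '?':
--             return el
--     return 0
--
-- def positive_case(x, y, s):
--     """
--     Fill in the missing letters of given string when both costs are positive.
--
--     Parameters
--     ----------
--     x: int
--         cost of 'CJ'
--     y: int
--         cost of 'JC'
--     s: str
--         The string
--
--     Returns
--     -------
--     new string with all '?' replace by C or J.
--     """
--     s_list = list(s)
--
--     # if no letters are filled, then replace all '?' with the same letter.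
--     if len(set(s_list)) == 1 and s_list[0] == '?':
--         return 'C'*len(s_list)
--
--     # if first char is ?, set it equal to the closest letter to the right of it
--     if s_list[0] == '?':
--         s_list[0] = find_closest_letter(s_list)
--
--     # for the rest of the '?', set them equal to the previous letter
--     for i in range(1, len(s_list)):
--         if s_list[i] == '?':
--             s_list[i] = s_list[i-1]
--
--     return ''.join(s_list)
-- ===== SOURCE B (Python) =====
-- def positive_case(x, y, s):
--     """Fill '?' by span-filling between the indexed letter positions."""
--     n = len(s)
--     pos = [(i, c) for i, c in enumerate(s) if c != '?']
--     if not pos: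
--         return 'C' * n
--     (i0, c0) = pos[0]
--     parts = [c0 * i0]
--     for (a, ca), (b, _) in zip(pos, pos[1:]):
--         parts.append(ca * (b - a))
--     (il, cl) = pos[-1]
--     parts.append(cl * (n - il))
--     return ''.join(parts)
-- ===== Notes on version B (the rewrite author's own statement) =====
-- stated objective: alternative
-- what changed: B replaces A's char-by-char forward propagation (seed first char, then copy previous letter into each '?') by computing the index list of letter positions once and emitting replicated spans (leading run, between-letters runs, trailing run) joined at the end.
-- outside the precondition, e.g. on positive_case(1, 2, ''): A raises IndexError, B returns ''
import Mathlib
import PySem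

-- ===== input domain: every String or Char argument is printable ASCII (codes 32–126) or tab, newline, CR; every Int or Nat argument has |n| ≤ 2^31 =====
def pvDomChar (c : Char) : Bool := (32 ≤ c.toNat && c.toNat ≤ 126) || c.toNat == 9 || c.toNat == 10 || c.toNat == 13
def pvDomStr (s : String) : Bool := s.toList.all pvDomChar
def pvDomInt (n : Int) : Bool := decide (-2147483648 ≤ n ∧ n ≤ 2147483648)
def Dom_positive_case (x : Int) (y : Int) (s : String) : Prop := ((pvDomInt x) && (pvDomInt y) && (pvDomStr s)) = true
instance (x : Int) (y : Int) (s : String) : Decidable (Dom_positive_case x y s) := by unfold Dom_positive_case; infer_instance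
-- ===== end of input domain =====

-- B replaces A's char-by-char forward propagation by an index-of-letters then span-fill construction (objective: alternative; return value only).

-- ===== PORT A =====
-- helper: Python's find_closest_letter (returns 0 when no letter; ported as Option Char, none = the 0 case)
def find_closest_letter (s : List Char) : Option Char :=
  match s with
  | [] => none
  | el :: rest => if el ≠ '?' then some el else find_closest_letter rest

-- the loop `for i in range(1, len): if s[i]=='?': s[i]=s[i-1]` as structural recursion carrying the previous char
def pvFillA (prev : Char) : List Char → List Char
  | [] => []
  | c :: cs => let c' := if c = '?' then prev else c; c' :: pvFillA c' cs

def positive_case (x : Int) (y : Int) (s : String) : String :=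
  let sl := s.toList
  -- if no letters are filled, replace all '?' with 'C'
  if (PySem.Set.ofList sl).length = 1 ∧ sl.headD ' ' = '?' then
    String.mk (List.replicate sl.length 'C')
  else
    match sl with
    | [] => ""   -- Python raises IndexError at s_list[0] here; excluded by Pre_
    | c0 :: rest =>
      -- if first char is '?', set it to the closest letter (the getD default is unreachable: some letter exists here)
      let c0' := if c0 = '?' then (find_closest_letter (c0 :: rest)).getD c0 else c0
      String.mk (c0' :: pvFillA c0' rest)

-- ===== PORT B =====
def positive_case_alt (x : Int) (y : Int) (s : String) : String :=
  let n := s.toList.length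
  let pos := (PySem.List.enumerate s.toList).filter (fun p => p.2 ≠ '?')
  match pos with
  | [] => String.mk (List.replicate n 'C')
  | (i0, c0) :: rest =>
    let parts := List.replicate i0.toNat c0
    let mids := (((i0, c0) :: rest).zip rest).flatMap
      (fun p => List.replicate (p.2.1 - p.1.1).toNat p.1.2)
    let last := ((i0, c0) :: rest).getLast (by simp)
    String.mk (parts ++ mids ++ List.replicate ((n : Int) - last.1).toNat last.2)

-- ===== PRECONDITION & SPEC =====
-- Pre_ excludes only the empty string, on which A raises IndexError (s_list[0]).
def Pre_positive_case (x : Int) (y : Int) (s : String) : Prop := s ≠ ""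
instance (x : Int) (y : Int) (s : String) : Decidable (Pre_positive_case x y s) := by unfold Pre_positive_case; infer_instance
def pvWitness_positive_case : Int × Int × String := (1, 2, "C?J?")

def Spec_positive_case (x : Int) (y : Int) (s : String) (out : String) : Prop := out = positive_case_alt x y s
instance (x : Int) (y : Int) (s : String) (out : String) : Decidable (Spec_positive_case x y s out) := by unfold Spec_positive_case; infer_instance

-- ===== CLAIM (what is proved, stated in full; the proofs are below) =====
def Claim_equal_positive_case : Prop := ∀ (x : Int) (y : Int) (s : String), Dom_positive_case x y s → Pre_positive_case x y s → Spec_positive_case x y s (positive_case x y s)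

-- ===== LEMMAS AND PROOFS =====

-- filtered enumerate with offset, as a direct recursion (proof-side view of B's pos list)
def posFrom (k : Int) : List Char → List (Int × Char)
  | [] => []
  | c :: t => if c = '?' then posFrom (k + 1) t else (k, c) :: posFrom (k + 1) t

theorem posFrom_eq_filter_enumerate (l : List Char) (k : Int) :
    (PySem.List.enumerate l k).filter (fun p => p.2 ≠ '?') = posFrom k l := by
  induction l generalizing k with
  | nil => simp [posFrom, PySem.List.enumerate_nil]
  | cons c t ih =>
    simp only [PySem.List.enumerate_cons, List.filter_cons, posFrom]
    by_cases h : c = '?' <;> simp [h, ← ih]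

theorem posFrom_bounds (l : List Char) (k : Int) :
    ∀ p ∈ posFrom k l, k ≤ p.1 := by
  induction l generalizing k with
  | nil => simp [posFrom]
  | cons c t ih =>
    intro p hp
    simp only [posFrom] at hp
    by_cases h : c = '?'
    · simp [h] at hp; have := ih (k+1) p hp; omega
    · simp [h] at hp
      rcases hp with hp | hp
      · simp [hp]
      · have := ih (k+1) p hp; omega

theorem posFrom_all_qm (l : List Char) (k : Int) (h : ∀ c ∈ l, c = '?') :
    posFrom k l = [] := by
  induction l generalizing k with
  | nil => rfl
  | cons c t ih =>
    simp only [posFrom, h c (by simp), if_pos]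
    exact ih (k+1) (fun c hc => h c (by simp [hc]))

-- the spine of B's construction: pairs-fill ++ trailing-fill, abstracted
def spanTail (n : Int) (cur : Int × Char) : List (Int × Char) → List Char
  | [] => List.replicate (n - cur.1).toNat cur.2
  | q :: ps => List.replicate (q.1 - cur.1).toNat cur.2 ++ spanTail n q ps

theorem spanTail_eq_zip (n : Int) (cur : Int × Char) (rest : List (Int × Char)) :
    ((cur :: rest).zip rest).flatMap (fun p => List.replicate (p.2.1 - p.1.1).toNat p.1.2)
      ++ List.replicate (n - ((cur :: rest).getLast (by simp)).1).toNat ((cur :: rest).getLast (by simp)).2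
    = spanTail n cur rest := by
  induction rest generalizing cur with
  | nil => simp [spanTail]
  | cons q ps ih =>
    simp only [List.zip_cons_cons, List.flatMap_cons, spanTail]
    rw [List.append_assoc]
    have hlast : (cur :: q :: ps).getLast (by simp) = (q :: ps).getLast (by simp) := by
      simp [List.getLast_cons]
    rw [hlast]
    exact congrArg _ (ih q)

theorem spanTail_shift (n : Int) (i : Int) (c : Char) (ps : List (Int × Char))
    (hb : ∀ p ∈ ps, i < p.1) (hn : i < n) :
    spanTail n (i, c) ps = c :: spanTail n (i + 1, c) ps := by
  cases ps with
  | nil =>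
    simp only [spanTail]
    have h1 : (n - i).toNat = (n - (i+1)).toNat + 1 := by omega
    simp [h1, List.replicate_succ]
  | cons q ps' =>
    have hq : i < q.1 := hb q (by simp)
    simp only [spanTail]
    have h1 : (q.1 - i).toNat = (q.1 - (i+1)).toNat + 1 := by omega
    simp [h1, List.replicate_succ]

-- main induction: B's span construction past a letter equals A's forward fill
theorem spanTail_eq_fill (t : List Char) (c : Char) (base : Int) (hc : c ≠ '?') :
    spanTail (base + 1 + t.length) (base, c) (posFrom (base + 1) t) = c :: pvFillA c t := by
  induction t generalizing c base with
  | nil =>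
    simp only [spanTail, posFrom, pvFillA, List.length_nil]
    have : (base + 1 + 0 - base).toNat = 1 := by omega
    simp [this]
  | cons d t' ih =>
    by_cases hd : d = '?'
    · subst hd
      rw [show posFrom (base + 1) ('?' :: t') = posFrom (base + 1 + 1) t' from by
        simp [posFrom]]
      have hshift : spanTail (base + 1 + (('?' :: t').length : Int)) (base, c) (posFrom (base + 1 + 1) t')
          = c :: spanTail (base + 1 + (('?' :: t').length : Int)) (base + 1, c) (posFrom (base + 1 + 1) t') := by
        apply spanTail_shift
        · intro p hp
          have := posFrom_bounds t' (base + 1 + 1) p hp; omega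
        · simp; omega
      rw [hshift]
      have hih := ih c (base + 1) hc
      have heq : (base + 1) + 1 + (t'.length : Int) = base + 1 + (('?' :: t').length : Int) := by
        simp; ring
      rw [heq] at hih
      rw [hih]
      simp [pvFillA]
    · rw [show posFrom (base + 1) (d :: t') = (base + 1, d) :: posFrom (base + 1 + 1) t' from by
        simp [posFrom, hd]]
      simp only [spanTail]
      have h1 : ((base + 1 : Int) - base).toNat = 1 := by omega
      have hih := ih d (base + 1) hd
      have heq : (base + 1) + 1 + (t'.length : Int) = base + 1 + ((t'.length : Int) + 1) := by
        ring
      rw [heq] at hih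
      simp [h1, hih, pvFillA, hd]

-- find_closest_letter on a leading '?'-block followed by a letter
theorem find_closest_spec (k : Nat) (c : Char) (t : List Char) (hc : c ≠ '?') :
    find_closest_letter (List.replicate k '?' ++ c :: t) = some c := by
  induction k with
  | zero => simp [find_closest_letter, hc]
  | succ m ih => simp [List.replicate_succ, find_closest_letter, ih]

-- A's fill through a leading block of '?'
theorem fill_replicate (k : Nat) (p : Char) (t : List Char) :
    pvFillA p (List.replicate k '?' ++ t) = List.replicate k p ++ pvFillA p t := by
  induction k with
  | zero => simp
  | succ m ih => simp [List.replicate_succ, pvFillA, ih]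

-- posFrom on a leading block of '?'
theorem posFrom_replicate (k : Nat) (t : List Char) (b : Int) :
    posFrom b (List.replicate k '?' ++ t) = posFrom (b + k) t := by
  induction k generalizing b with
  | zero => simp
  | succ m ih =>
    simp only [List.replicate_succ, List.cons_append, posFrom, if_pos]
    rw [ih]; congr 1; push_cast; ring

-- every list of chars is all-'?' or splits as replicate k '?' ++ c :: t with c ≠ '?'
theorem char_list_split (l : List Char) :
    (∀ c ∈ l, c = '?') ∨ ∃ k c t, c ≠ '?' ∧ l = List.replicate k '?' ++ c :: t := by
  induction l with
  | nil => exact Or.inl (by simp)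
  | cons d l' ih =>
    by_cases hd : d = '?'
    · rcases ih with h | ⟨k, c, t, hc, ht⟩
      · exact Or.inl (by subst hd; simpa using h)
      · refine Or.inr ⟨k + 1, c, t, hc, ?_⟩
        subst hd; simp [List.replicate_succ, ht]
    · exact Or.inr ⟨0, d, l', hd, by simp⟩

theorem foldl_add_all_qm (m : List Char) (h : ∀ c ∈ m, c = '?') :
    m.foldl PySem.Set.add ['?'] = ['?'] := by
  induction m with
  | nil => rfl
  | cons c t ih =>
    have hc : c = '?' := h c (by simp)
    subst hc
    have : PySem.Set.add ['?'] '?' = ['?'] := by decide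
    simp only [List.foldl_cons, this]
    exact ih (fun c hc => h c (by simp [hc]))

-- A's guard tests exactly "nonempty and all '?'"
theorem guard_iff (l : List Char) (hne : l ≠ []) :
    ((PySem.Set.ofList l).length = 1 ∧ l.headD ' ' = '?') ↔ (∀ c ∈ l, c = '?') := by
  obtain ⟨d0, tl, rfl⟩ : ∃ d0 tl, l = d0 :: tl := by
    cases l with
    | nil => exact absurd rfl hne
    | cons a b => exact ⟨a, b, rfl⟩
  constructor
  · rintro ⟨hlen, hhead⟩ c hc
    simp only [List.headD_cons] at hhead
    rcases List.length_eq_one_iff.mp hlen with ⟨u, hu⟩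
    have hd0 : d0 ∈ PySem.Set.ofList (d0 :: tl) := by simp [PySem.Set.mem_ofList]
    have hcm : c ∈ PySem.Set.ofList (d0 :: tl) := by
      rw [PySem.Set.mem_ofList]; exact hc
    rw [hu] at hd0 hcm
    simp at hd0 hcm
    rw [hcm, ← hd0, hhead]
  · intro hall
    have hd0 : d0 = '?' := hall d0 (by simp)
    subst hd0
    refine ⟨?_, by simp⟩
    have : PySem.Set.ofList ('?' :: tl) = ['?'] := by
      rw [PySem.Set.ofList_eq_foldl]
      simp only [List.foldl_cons]
      have : PySem.Set.add [] '?' = ['?'] := by decide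
      rw [this]
      exact foldl_add_all_qm tl (fun c hc => hall c (by simp [hc]))
    simp [this]

-- A's result on the split form
theorem portA_split (x y : Int) (s : String) (k : Nat) (c : Char) (t : List Char)
    (hc : c ≠ '?') (hs : s.toList = List.replicate k '?' ++ c :: t) :
    positive_case x y s = String.mk (List.replicate k c ++ (c :: pvFillA c t)) := by
  have hnotall : ¬ (∀ d ∈ s.toList, d = '?') := by
    intro h
    exact hc (h c (by simp [hs]))
  have hne : s.toList ≠ [] := by rw [hs]; simp
  unfold positive_case
  rw [if_neg (fun hg => hnotall ((guard_iff s.toList hne).mp hg))]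
  cases k with
  | zero =>
    simp only [List.replicate, List.nil_append] at hs
    rw [hs]
    simp [hc, pvFillA]
  | succ m =>
    rw [show s.toList = '?' :: (List.replicate m '?' ++ c :: t) from by
      simpa [List.replicate_succ] using hs]
    have hfc : find_closest_letter ('?' :: (List.replicate m '?' ++ c :: t)) = some c := by
      have := find_closest_spec (m + 1) c t hc
      simpa [List.replicate_succ] using this
    simp only [if_pos rfl, hfc, Option.getD_some]
    rw [fill_replicate]
    simp [List.replicate_succ, pvFillA, hc]

-- B's result on the split form
theorem portB_split (x y : Int) (s : String) (k : Nat) (c : Char) (t : List Char)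
    (hc : c ≠ '?') (hs : s.toList = List.replicate k '?' ++ c :: t) :
    positive_case_alt x y s = String.mk (List.replicate k c ++ (c :: pvFillA c t)) := by
  have hpos : (PySem.List.enumerate s.toList 0).filter (fun p => p.2 ≠ '?')
      = ((k : Int), c) :: posFrom ((k : Int) + 1) t := by
    rw [posFrom_eq_filter_enumerate, hs, posFrom_replicate]
    simp [posFrom, hc]
  unfold positive_case_alt
  simp only [hpos]
  rw [List.append_assoc, spanTail_eq_zip]
  have hlen : (s.toList.length : Int) = (k : Int) + 1 + (t.length : Int) := by
    rw [hs]
    simp only [List.length_append, List.length_replicate, List.length_cons]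
    push_cast; ring
  rw [hlen]
  rw [spanTail_eq_fill t c (k : Int) hc]
  simp

-- ===== VERDICT (by name: the statement is the Claim_ definition above) =====
theorem positive_case_spec : Claim_equal_positive_case := by
  intro x y s _ hpre
  unfold Spec_positive_case
  have hne : s.toList ≠ [] := by
    simpa [String.toList_eq_nil_iff] using hpre
  rcases char_list_split s.toList with hall | ⟨k, c, t, hc, hs⟩
  · -- all '?': both return 'C' * len
    have hguard := (guard_iff s.toList hne).mpr hall
    have hpos : (PySem.List.enumerate s.toList 0).filter (fun p => p.2 ≠ '?') = [] := by
      rw [posFrom_eq_filter_enumerate]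
      exact posFrom_all_qm s.toList 0 hall
    unfold positive_case positive_case_alt
    rw [if_pos hguard]
    simp only [hpos]
  · rw [portA_split x y s k c t hc hs, portB_split x y s k c t hc hs]
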